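-- pv_equiv track=rewrite | github.com/TriplePool/maskrcnn-benchmark | maskrcnn_benchmark/data/datasets/face_dataset.py | split_data_with_domain
-- ===== SOURCE A (Python) =====
-- def split_data_with_domain(datalist):
--     res = {}
--     for d in datalist:
--         img_path, class_id, domain_id = d
--         if domain_id not in res:
--             res[domain_id] = [(img_path, class_id)]
--         else:
--             res[domain_id].append((img_path, class_id))
--     return res
-- ===== SOURCE B (Python) =====
-- def split_data_with_domain(datalist):
--     # Two-pass grouping: collect domain ids in first-appearance order,
--     # then build each group by filtering the whole list per domain.
--     order = []
--     for _, _, dom in datalist: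
--         if dom not in order:
--             order.append(dom)
--     return {dom: [(p, c) for p, c, d in datalist if d == dom] for dom in order}
-- ===== Notes on version B (the rewrite author's own statement) =====
-- stated objective: alternative
-- what changed: Replaces the incremental dict-building single pass (insert-or-append per element) with a two-pass scheme: first collect the distinct domain ids in first-appearance order, then build each group at once by filtering the list per domain id.
import Mathlib
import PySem

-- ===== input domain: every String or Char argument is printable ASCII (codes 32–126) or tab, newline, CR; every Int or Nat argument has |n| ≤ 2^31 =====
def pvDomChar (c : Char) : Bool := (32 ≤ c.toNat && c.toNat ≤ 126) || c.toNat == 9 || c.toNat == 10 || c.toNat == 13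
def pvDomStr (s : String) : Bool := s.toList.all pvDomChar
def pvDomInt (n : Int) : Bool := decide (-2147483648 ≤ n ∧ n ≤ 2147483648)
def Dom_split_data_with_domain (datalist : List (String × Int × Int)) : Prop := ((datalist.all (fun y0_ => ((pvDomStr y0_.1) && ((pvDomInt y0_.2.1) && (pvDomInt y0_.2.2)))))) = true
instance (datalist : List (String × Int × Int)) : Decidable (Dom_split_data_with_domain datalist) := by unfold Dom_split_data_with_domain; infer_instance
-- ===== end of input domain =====

-- B builds the dict in two passes (first-appearance key order, then one filter per key)
-- instead of A's per-element insert-or-append loop; same result, proved equal.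

-- ===== PORT A =====
def split_data_with_domain (datalist : List (String × Int × Int)) : List (Int × List (String × Int)) :=
  (datalist.foldl (fun res d =>
      if res.contains d.2.2 = false then
        res.insert d.2.2 [(d.1, d.2.1)]
      else
        -- res[domain_id].append((img_path, class_id)): overwrite the list at that key in place
        res.insert d.2.2 (res.getD d.2.2 [] ++ [(d.1, d.2.1)]))
    (PySem.Dict.empty)).items

-- ===== PORT B =====
def split_data_with_domain_alt (datalist : List (String × Int × Int)) : List (Int × List (String × Int)) :=
  let order := datalist.foldl (fun ord t => if t.2.2 ∈ ord then ord else ord ++ [t.2.2]) []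
  order.map (fun dom => (dom, (datalist.filter (fun t => t.2.2 = dom)).map (fun t => (t.1, t.2.1))))

-- ===== PRECONDITION & SPEC =====
def Spec_split_data_with_domain (datalist : List (String × Int × Int)) (out : List (Int × List (String × Int))) : Prop := out = split_data_with_domain_alt datalist
instance (datalist : List (String × Int × Int)) (out : List (Int × List (String × Int))) : Decidable (Spec_split_data_with_domain datalist out) := by unfold Spec_split_data_with_domain; infer_instance

-- ===== CLAIM (what is proved, stated in full; the proofs are below) =====
def Claim_equal_split_data_with_domain : Prop := ∀ (datalist : List (String × Int × Int)), Dom_split_data_with_domain datalist → Spec_split_data_with_domain datalist (split_data_with_domain datalist)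

-- ===== LEMMAS AND PROOFS =====

-- B's first pass (the domain-id order list), as a standalone function for the proofs
def pvOrder (l : List (String × Int × Int)) (acc : List Int) : List Int :=
  l.foldl (fun ord t => if t.2.2 ∈ ord then ord else ord ++ [t.2.2]) acc

-- B's per-domain group
def pvGrp (l : List (String × Int × Int)) (dom : Int) : List (String × Int) :=
  (l.filter (fun t => t.2.2 = dom)).map (fun t => (t.1, t.2.1))

lemma pvOrder_mem (l : List (String × Int × Int)) (acc : List Int) (dom : Int) :
    dom ∈ pvOrder l acc ↔ dom ∈ acc ∨ ∃ t ∈ l, t.2.2 = dom := by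
  induction l generalizing acc with
  | nil => simp [pvOrder]
  | cons x xs ih =>
    simp only [pvOrder, List.foldl_cons] at *
    by_cases hx : x.2.2 ∈ acc
    · simp only [hx, if_pos, ih]
      constructor
      · rintro (h | h)
        · exact Or.inl h
        · exact Or.inr (by simpa using Or.inr h)
      · rintro (h | ⟨t, ht, rfl⟩)
        · exact Or.inl h
        · rcases List.mem_cons.mp ht with rfl | ht
          · exact Or.inl hx
          · exact Or.inr ⟨t, ht, rfl⟩
    · simp only [hx, if_neg, not_false_iff, ih]
      constructor
      · rintro (h | h)
        · rcases List.mem_append.mp h with h | h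
          · exact Or.inl h
          · simp at h; exact Or.inr ⟨x, List.mem_cons_self .., h.symm⟩
        · exact Or.inr (by simpa using Or.inr h)
      · rintro (h | ⟨t, ht, rfl⟩)
        · exact Or.inl (List.mem_append.mpr (Or.inl h))
        · rcases List.mem_cons.mp ht with rfl | ht
          · exact Or.inl (by simp)
          · exact Or.inr ⟨t, ht, rfl⟩

lemma pvOrder_nodup (l : List (String × Int × Int)) (acc : List Int) (h : acc.Nodup) :
    (pvOrder l acc).Nodup := by
  induction l generalizing acc with
  | nil => simpa [pvOrder]
  | cons x xs ih =>
    simp only [pvOrder, List.foldl_cons]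
    by_cases hx : x.2.2 ∈ acc
    · simpa [hx] using ih acc h
    · simp only [hx, if_neg, not_false_iff]
      refine ih _ ?_
      rw [List.nodup_append]
      refine ⟨h, List.nodup_singleton _, ?_⟩
      intro a ha b hb
      simp only [List.mem_singleton] at hb
      subst hb
      exact fun h' => hx (h' ▸ ha)

lemma pvOrder_append (l : List (String × Int × Int)) (x : String × Int × Int) (acc : List Int) :
    pvOrder (l ++ [x]) acc =
      if x.2.2 ∈ pvOrder l acc then pvOrder l acc else pvOrder l acc ++ [x.2.2] := by
  simp [pvOrder, List.foldl_append]

lemma pvGrp_append (l : List (String × Int × Int)) (x : String × Int × Int) (dom : Int) :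
    pvGrp (l ++ [x]) dom =
      pvGrp l dom ++ (if x.2.2 = dom then [(x.1, x.2.1)] else []) := by
  by_cases h : x.2.2 = dom <;> simp [pvGrp, h]

-- main invariant: A's dict after processing l has exactly B's items
lemma pvMain (l : List (String × Int × Int)) :
    (l.foldl (fun res d =>
      if res.contains d.2.2 = false then
        res.insert d.2.2 [(d.1, d.2.1)]
      else
        res.insert d.2.2 (res.getD d.2.2 [] ++ [(d.1, d.2.1)]))
      (PySem.Dict.empty)).items
    = (pvOrder l []).map (fun dom => (dom, pvGrp l dom)) := by
  induction l using List.reverseRecOn with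
  | nil => simp [pvOrder, pvGrp, PySem.Dict.empty]
  | append_singleton l x ih =>
    rw [List.foldl_append, List.foldl_cons, List.foldl_nil]
    set F := (l.foldl (fun res d =>
      if res.contains d.2.2 = false then
        res.insert d.2.2 [(d.1, d.2.1)]
      else
        res.insert d.2.2 (res.getD d.2.2 [] ++ [(d.1, d.2.1)]))
      (PySem.Dict.empty)) with hF
    have hkeys : F.keys = pvOrder l [] := by
      simp only [PySem.Dict.keys, ih, List.map_map]
      exact (List.map_congr_left (fun a _ => rfl)).trans (List.map_id _)
    have hnd : F.keys.Nodup := by rw [hkeys]; exact pvOrder_nodup l [] List.nodup_nil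
    have hcont : F.contains x.2.2 = decide (x.2.2 ∈ pvOrder l []) := by
      rw [PySem.Dict.contains_eq_decide_mem_keys, hkeys]
    by_cases hmem : x.2.2 ∈ pvOrder l []
    · -- key already present: insert overwrites in place
      have hc : F.contains x.2.2 = true := by rw [hcont]; simp [hmem]
      rw [hc]
      simp only [Bool.true_eq_false, if_neg, not_false_iff]
      rw [PySem.Dict.items_insert_of_contains _ _ hc, ih]
      have hgetD : F.getD x.2.2 [] = pvGrp l x.2.2 := by
        apply PySem.Dict.getD_of_mem_items F ?_ hnd
        rw [ih]
        exact List.mem_map.mpr ⟨x.2.2, hmem, rfl⟩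
      rw [hgetD, pvOrder_append, if_pos hmem, List.map_map]
      apply List.map_congr_left
      intro dom hdom
      by_cases hdx : dom = x.2.2
      · subst hdx
        simp [pvGrp_append]
      · simp only [Function.comp_apply]
        rw [if_neg (by simpa using hdx)]
        simp [pvGrp_append, Ne.symm hdx]
    · -- new key: appended at the end
      have hc : F.contains x.2.2 = false := by rw [hcont]; exact decide_eq_false hmem
      rw [hc]
      simp only [reduceIte]
      rw [PySem.Dict.items_insert_of_not_contains _ _ hc, ih]
      rw [pvOrder_append, if_neg hmem]
      rw [List.map_append]
      congr 1
      · apply List.map_congr_left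
        intro dom hdom
        have hdx : x.2.2 ≠ dom := fun h => hmem (h ▸ hdom)
        simp [pvGrp_append, hdx]
      · have hgrp : pvGrp l x.2.2 = [] := by
          have : ∀ t ∈ l, ¬ t.2.2 = x.2.2 := by
            intro t ht h
            exact hmem ((pvOrder_mem l [] x.2.2).mpr (Or.inr ⟨t, ht, h⟩))
          simp only [pvGrp, List.map_eq_nil_iff, List.filter_eq_nil_iff]
          intro t ht
          simpa using this t ht
        simp [pvGrp_append, hgrp]

-- ===== VERDICT (by name: the statement is the Claim_ definition above) =====
theorem split_data_with_domain_spec : Claim_equal_split_data_with_domain := by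
  intro datalist _
  unfold Spec_split_data_with_domain split_data_with_domain split_data_with_domain_alt
  exact pvMain datalist
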